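-- pv_equiv track=rewrite | github.com/mlelarge/graph-conjectures | problems/directed_path_minimum_outdegree/scripts/k4_n11_overflow_cases.py | is_shape_a1
-- ===== SOURCE A (Python) =====
-- def is_shape_a1(S):
--     """Shape A1: S is a 4-cyclic-interval in V(C) = {1, ..., 7}."""
--     S_set = set(S)
--     for start in range(1, 8):
--         interval = set()
--         v = start
--         for _ in range(4):
--             interval.add(v)
--             v = v + 1 if v < 7 else 1
--         if interval == S_set:
--             return True
--     return False
-- ===== SOURCE B (Python) =====
-- def is_shape_a1(S):
--     """Shape A1: S is a 4-cyclic-interval in V(C) = {1, ..., 7}."""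
--     s = set(S)
--     if len(s) != 4 or not s.issubset(set(range(1, 8))):
--         return False
--     a, b, c, d = sorted(s)
--     gaps = [b - a, c - b, d - c, a + 7 - d]
--     big = 0
--     for g in gaps:
--         if g > 1:
--             big += 1
--     return big == 1
-- ===== Notes on version B (the rewrite author's own statement) =====
-- stated objective: simpler
-- what changed: Instead of enumerating all 7 candidate cyclic intervals and comparing each as a set against set(S), B checks directly that set(S) is a 4-element subset of {1..7} and that the sorted elements have exactly one cyclic gap greater than 1.
import Mathlib
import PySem

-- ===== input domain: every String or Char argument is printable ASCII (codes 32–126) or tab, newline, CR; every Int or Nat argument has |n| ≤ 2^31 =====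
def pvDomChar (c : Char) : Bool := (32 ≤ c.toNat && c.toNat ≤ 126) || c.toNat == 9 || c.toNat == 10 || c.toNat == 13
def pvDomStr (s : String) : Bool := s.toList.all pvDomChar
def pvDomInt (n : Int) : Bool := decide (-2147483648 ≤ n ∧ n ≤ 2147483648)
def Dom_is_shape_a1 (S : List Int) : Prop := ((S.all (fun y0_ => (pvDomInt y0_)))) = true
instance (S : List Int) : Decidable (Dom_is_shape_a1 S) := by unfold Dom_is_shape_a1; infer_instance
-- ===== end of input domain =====

-- B replaces A's enumeration of the 7 candidate cyclic intervals by a direct test: size-4 subset of {1..7} whose sorted elements have exactly one cyclic gap > 1 (objective: simpler).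

-- ===== PORT A =====
def is_shape_a1 (S : List Int) : Bool :=
  let sSet : PySem.Set Int := PySem.Set.ofList S
  (PySem.List.pyRange 1 8 1).any (fun start =>
    let p := (List.range 4).foldl
      (fun (p : PySem.Set Int × Int) _ =>
        (PySem.Set.add p.1 p.2, if p.2 < 7 then p.2 + 1 else 1))
      (PySem.Set.empty, start)
    PySem.Set.equal p.1 sSet)

-- ===== PORT B =====
def is_shape_a1_alt (S : List Int) : Bool :=
  let s : PySem.Set Int := PySem.Set.ofList S
  if PySem.Set.len s != 4 || !(PySem.Set.issubset s (PySem.Set.ofList (PySem.List.pyRange 1 8 1))) then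
    false
  else
    match PySem.List.sorted s (fun x => x) false with
    | [a, b, c, d] =>
      let gaps : List Int := [b - a, c - b, d - c, a + 7 - d]
      let big := gaps.foldl (fun n g => if g > 1 then n + 1 else n) (0 : Int)
      big == 1
    | _ => false

-- ===== PRECONDITION & SPEC =====
def Spec_is_shape_a1 (S : List Int) (out : Bool) : Prop := out = is_shape_a1_alt S
instance (S : List Int) (out : Bool) : Decidable (Spec_is_shape_a1 S out) := by unfold Spec_is_shape_a1; infer_instance

-- ===== CLAIM (what is proved, stated in full; the proofs are below) =====
def Claim_equal_is_shape_a1 : Prop := ∀ (S : List Int), Dom_is_shape_a1 S → Spec_is_shape_a1 S (is_shape_a1 S)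

-- ===== LEMMAS AND PROOFS =====

-- The seven 4-cyclic-intervals of {1..7}, in the insertion order A builds them.
def pvIvs : List (List Int) :=
  [[1,2,3,4],[2,3,4,5],[3,4,5,6],[4,5,6,7],[5,6,7,1],[6,7,1,2],[7,1,2,3]]

lemma A_char (S : List Int) :
    is_shape_a1 S = true ↔ ∃ T ∈ pvIvs, ∀ x : Int, x ∈ T ↔ x ∈ S := by
  have h : is_shape_a1 S = pvIvs.any (fun T => PySem.Set.equal T (PySem.Set.ofList S)) := rfl
  rw [h, List.any_eq_true]
  refine exists_congr fun T => and_congr_right fun _ => ?_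
  rw [PySem.Set.equal_iff]
  exact forall_congr' fun x => iff_congr Iff.rfl (PySem.Set.mem_ofList S x)

-- B = true when S's distinct elements are exactly those of Y (a strictly increasing
-- 4-list inside {1..7} with exactly one big cyclic gap).
lemma B_of_interval (S : List Int) (Y : List Int)
    (hY4 : Y.length = 4) (hYlt : Y.Pairwise (· < ·))
    (hYr : ∀ x ∈ Y, x ∈ PySem.Set.ofList (PySem.List.pyRange 1 8 1))
    (hm : ∀ x : Int, x ∈ Y ↔ x ∈ S)
    (hgap : (match Y with
      | [a, b, c, d] =>
          ([b - a, c - b, d - c, a + 7 - d].foldl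
            (fun n g => if g > 1 then n + 1 else n) (0 : Int)) == 1
      | _ => false) = true) :
    is_shape_a1_alt S = true := by
  have hperm : Y.Perm (PySem.Set.ofList S) := by
    refine (List.perm_ext_iff_of_nodup (hYlt.imp ne_of_lt) (PySem.Set.nodup_ofList S)).mpr ?_
    intro x
    rw [PySem.Set.mem_ofList, hm]
  have hsort : PySem.List.sorted (PySem.Set.ofList S) (fun x => x) false = Y :=
    PySem.List.sorted_eq_of_perm_of_pairwise_lt _ _ _ hperm hYlt
  have hlen : PySem.Set.len (PySem.Set.ofList S) = 4 := by
    simp [PySem.Set.len, ← hperm.length_eq, hY4]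
  have hsub : PySem.Set.issubset (PySem.Set.ofList S)
      (PySem.Set.ofList (PySem.List.pyRange 1 8 1)) = true := by
    rw [PySem.Set.issubset_iff]
    intro x hx
    exact hYr x (hperm.mem_iff.mpr hx)
  simp only [is_shape_a1_alt, hlen, hsub, hsort]
  simpa using hgap

lemma main_eq (S : List Int) : is_shape_a1 S = is_shape_a1_alt S := by
  rw [Bool.eq_iff_iff, A_char S]
  constructor
  · rintro ⟨T, hT, hm⟩
    simp only [pvIvs, List.mem_cons, List.not_mem_nil, or_false] at hT
    rcases hT with h | h | h | h | h | h | h <;> subst h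
    · exact B_of_interval S [1,2,3,4] rfl (by decide) (by decide)
        (fun x => by rw [← hm x]) (by decide)
    · exact B_of_interval S [2,3,4,5] rfl (by decide) (by decide)
        (fun x => by rw [← hm x]) (by decide)
    · exact B_of_interval S [3,4,5,6] rfl (by decide) (by decide)
        (fun x => by rw [← hm x]) (by decide)
    · exact B_of_interval S [4,5,6,7] rfl (by decide) (by decide)
        (fun x => by rw [← hm x]) (by decide)
    · exact B_of_interval S [1,5,6,7] rfl (by decide) (by decide)
        (fun x => by rw [← hm x]; simp; tauto) (by decide)
    · exact B_of_interval S [1,2,6,7] rfl (by decide) (by decide)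
        (fun x => by rw [← hm x]; simp; tauto) (by decide)
    · exact B_of_interval S [1,2,3,7] rfl (by decide) (by decide)
        (fun x => by rw [← hm x]; simp; tauto) (by decide)
  · intro hB
    simp only [is_shape_a1_alt] at hB
    split at hB
    · exact absurd hB (by simp)
    rename_i hguard
    rw [Bool.or_eq_true, not_or, Bool.not_eq_true, Bool.not_eq_true] at hguard
    obtain ⟨hlen, hsub⟩ := hguard
    have hlen4 : (PySem.Set.ofList S).length = 4 := by
      have := bne_eq_false_iff_eq.mp hlen
      simp only [PySem.Set.len] at this
      exact_mod_cast this
    have hsub2 : (PySem.Set.ofList S).issubset (PySem.Set.ofList (PySem.List.pyRange 1 8 1)) = true := by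
      simpa using hsub
    have hsub' : ∀ x ∈ PySem.Set.ofList S, (1:Int) ≤ x ∧ x ≤ 7 := by
      intro x hx
      have hx2 := (PySem.Set.issubset_iff _ _).mp hsub2 x hx
      have hx3 : x ∈ PySem.List.pyRange 1 8 1 := by
        simpa [PySem.Set.mem_ofList] using hx2
      have := (PySem.List.mem_pyRange_one).mp hx3
      omega
    have hplt := PySem.List.sorted_ofList_pairwise_lt S
    have hslen : (PySem.List.sorted (PySem.Set.ofList S) (fun x => x) false).length = 4 := by
      rw [PySem.List.length_sorted, hlen4]
    have hsmem : ∀ x, x ∈ PySem.List.sorted (PySem.Set.ofList S) (fun x => x) false ↔ x ∈ S := by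
      intro x
      rw [(PySem.List.sorted_perm (PySem.Set.ofList S) (fun x => x) false).mem_iff,
        PySem.Set.mem_ofList]
    match hL : PySem.List.sorted (PySem.Set.ofList S) (fun x => x) false, hslen' : hslen with
    | [a, b, c, d], _ =>
      rw [hL] at hB hplt hsmem
      simp only [List.pairwise_cons, List.mem_cons, List.not_mem_nil, or_false] at hplt
      have hab : a < b := by tauto
      have hbc : b < c := by tauto
      have hcd : c < d := by tauto
      have haS : a ∈ S := (hsmem a).mp (by simp)
      have hdS : d ∈ S := (hsmem d).mp (by simp)
      have h1a : (1:Int) ≤ a := (hsub' a ((PySem.Set.mem_ofList S a).mpr haS)).1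
      have hd7 : d ≤ (7:Int) := (hsub' d ((PySem.Set.mem_ofList S d).mpr hdS)).2
      simp only [List.foldl, beq_iff_eq] at hB
      split_ifs at hB <;> try omega
      · -- big gap is the wrap gap: a plain interval [a, a+3]
        have hb : b = a + 1 := by omega
        have hc : c = a + 2 := by omega
        have hd : d = a + 3 := by omega
        subst hb hc hd
        have ha1 : (1:Int) ≤ a := h1a
        have ha4 : a ≤ (4:Int) := by omega
        interval_cases a
        · exact ⟨[1,2,3,4], by simp [pvIvs], fun x => by rw [← hsmem x]; norm_num⟩
        · exact ⟨[2,3,4,5], by simp [pvIvs], fun x => by rw [← hsmem x]; norm_num⟩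
        · exact ⟨[3,4,5,6], by simp [pvIvs], fun x => by rw [← hsmem x]; norm_num⟩
        · exact ⟨[4,5,6,7], by simp [pvIvs], fun x => by rw [← hsmem x]; norm_num⟩
      · -- big gap is d - c: {7,1,2,3}
        have h : a = 1 ∧ b = 2 ∧ c = 3 ∧ d = 7 := by omega
        obtain ⟨ha, hb, hc, hd⟩ := h; subst ha hb hc hd
        exact ⟨[7,1,2,3], by simp [pvIvs], fun x => by rw [← hsmem x]; simp; tauto⟩
      · -- big gap is c - b: {6,7,1,2}
        have h : a = 1 ∧ b = 2 ∧ c = 6 ∧ d = 7 := by omega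
        obtain ⟨ha, hb, hc, hd⟩ := h; subst ha hb hc hd
        exact ⟨[6,7,1,2], by simp [pvIvs], fun x => by rw [← hsmem x]; simp; tauto⟩
      · -- big gap is b - a: the interval wraps as {5,6,7,1}
        have h : a = 1 ∧ b = 5 ∧ c = 6 ∧ d = 7 := by omega
        obtain ⟨ha, hb, hc, hd⟩ := h; subst ha hb hc hd
        exact ⟨[5,6,7,1], by simp [pvIvs], fun x => by rw [← hsmem x]; simp; tauto⟩


-- ===== VERDICT (by name: the statement is the Claim_ definition above) =====
theorem is_shape_a1_spec : Claim_equal_is_shape_a1 := by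
  intro S _
  show is_shape_a1 S = is_shape_a1_alt S
  exact main_eq S
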